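-- pv_equiv track=rewrite | github.com/behlendorf/nnf-sos | tools/nnf/src/nnf/commands/system/state.py | _compress_hostlist
-- ===== SOURCE A (Python) =====
-- from typing import Any, Dict, List, Optional, Tuple
--
-- def _compress_hostlist(names: List[str]) -> str:
--     """Compress a list of hostnames into bracketed range notation.
--
--     For example: ["rabbit-node-1", "rabbit-node-2", "rabbit-compute-2",
--     "rabbit-compute-3", "rabbit-compute-4", "rabbit-compute-5"]
--     becomes "rabbit-compute-[2-5],rabbit-node-[1-2]".
--
--     Names that don't end in digits are left as-is.
--     """
--     if not names:
--         return ""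
--     if len(names) == 1:
--         return names[0]
--
--     # Split each name into (prefix, number).  Names without a numeric
--     # suffix are kept verbatim in the output.
--     groups: Dict[str, List[int]] = {}
--     plain: List[str] = []
--     for name in sorted(names):
--         i = len(name)
--         while i > 0 and name[i - 1].isdigit():
--             i -= 1
--         if i == len(name) or i == 0:
--             plain.append(name)
--         else:
--             prefix = name[:i]
--             groups.setdefault(prefix, []).append(int(name[i:]))
--
--     parts: List[str] = []
--     for prefix in sorted(groups):
--         nums = sorted(groups[prefix])
--         if len(nums) == 1:
--             parts.append(f"{prefix}{nums[0]}")
--             continue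
--         ranges: List[str] = []
--         start = end = nums[0]
--         for n in nums[1:]:
--             if n == end + 1:
--                 end = n
--             else:
--                 ranges.append(str(start) if start == end else f"{start}-{end}")
--                 start = end = n
--         ranges.append(str(start) if start == end else f"{start}-{end}")
--         parts.append(f"{prefix}[{','.join(ranges)}]")
--
--     parts.extend(sorted(plain))
--     return ",".join(parts)
-- ===== SOURCE B (Python) =====
-- from typing import Dict, List
--
--
-- def _compress_hostlist(names: List[str]) -> str:
--     """Compress a list of hostnames into bracketed range notation."""
--     if not names:
--         return ""
--     if len(names) == 1:
--         return names[0]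
--
--     groups: Dict[str, List[int]] = {}
--     plain: List[str] = []
--     for name in names:
--         prefix = name.rstrip("0123456789")
--         if not prefix or prefix == name:
--             plain.append(name)
--         else:
--             groups.setdefault(prefix, []).append(int(name[len(prefix):]))
--
--     def pieces(nums: List[int]) -> List[str]:
--         # nums is sorted; peel off one maximal consecutive run, recurse on the rest.
--         if not nums:
--             return []
--         run = 1
--         while run < len(nums) and nums[run] == nums[run - 1] + 1:
--             run += 1
--         lo, hi = nums[0], nums[run - 1]
--         return [str(lo) if lo == hi else "%d-%d" % (lo, hi)] + pieces(nums[run:])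
--
--     def block(prefix: str) -> str:
--         nums = sorted(groups[prefix])
--         if len(nums) == 1:
--             return "%s%d" % (prefix, nums[0])
--         return "%s[%s]" % (prefix, ",".join(pieces(nums)))
--
--     return ",".join([block(p) for p in sorted(groups)] + sorted(plain))
-- ===== Notes on version B (the rewrite author's own statement) =====
-- stated objective: alternative
-- what changed: B skips A's initial whole-list sort, parses suffixes with rstrip instead of an index-decrementing while loop, and replaces A's (ranges,start,end) accumulator state machine with a recursive function that peels one maximal consecutive run per call and joins everything in a single pass.
import Mathlib
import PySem

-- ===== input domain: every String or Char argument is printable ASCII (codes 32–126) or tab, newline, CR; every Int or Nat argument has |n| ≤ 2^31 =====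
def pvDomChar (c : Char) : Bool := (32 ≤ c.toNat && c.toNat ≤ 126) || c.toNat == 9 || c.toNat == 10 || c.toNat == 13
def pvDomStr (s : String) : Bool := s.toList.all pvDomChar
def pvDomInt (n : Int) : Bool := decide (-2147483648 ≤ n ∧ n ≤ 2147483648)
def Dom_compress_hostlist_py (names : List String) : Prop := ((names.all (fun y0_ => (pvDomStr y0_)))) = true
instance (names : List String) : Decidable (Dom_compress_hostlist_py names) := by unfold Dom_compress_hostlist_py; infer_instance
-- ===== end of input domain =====

-- B re-implements A with a different decomposition (no initial whole-list sort, rstrip-style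
-- suffix parsing, a recursive peel-one-run-per-call range builder instead of A's
-- (ranges, start, end) accumulator state machine); same return value everywhere.

-- ===== PORT A =====

-- A's inner `while i > 0 and name[i-1].isdigit(): i -= 1`, as a countdown recursion on i.
def pvScanA (cs : List Char) : Nat → Nat
  | 0 => 0
  | i + 1 => if PySem.Chars.isdigit (cs.getD i ' ') then pvScanA cs i else i + 1

def compress_hostlist_py (names : List String) : String :=
  if names = [] then ""
  else if names.length = 1 then PySem.List.pyGetD names 0 ""
  else
    -- for name in sorted(names): split into groups / plain
    let st := (PySem.List.sorted names (fun x => x) false).foldl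
      (fun (st : PySem.Dict String (List Int) × List String) name =>
        let cs := name.toList
        let i := pvScanA cs cs.length
        if i = cs.length ∨ i = 0 then (st.1, st.2 ++ [name])
        else
          let pre := String.ofList (cs.take i)                    -- name[:i]
          let n := (PySem.Int.ofChars? (cs.drop i)).getD 0        -- int(name[i:]); the suffix is a nonempty digit run, so int() never raises
          (st.1.insert pre (st.1.getD pre [] ++ [n]), st.2))      -- groups.setdefault(pre, []).append(n)
      (PySem.Dict.empty, [])
    -- for prefix in sorted(groups): compress each group with the (ranges, start, end) accumulator
    let parts := (PySem.List.sorted st.1.keys (fun x => x) false).foldl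
      (fun (parts : List String) pre =>
        let nums := PySem.List.sorted (st.1.getD pre []) (fun x => x) false
        if nums.length = 1 then parts ++ [pre ++ PySem.Int.toStr (PySem.List.pyGetD nums 0 0)]
        else
          let acc := (nums.drop 1).foldl                           -- for n in nums[1:]
            (fun (acc : List String × Int × Int) n =>
              if n = acc.2.2 + 1 then (acc.1, acc.2.1, n)
              else (acc.1 ++ [if acc.2.1 = acc.2.2 then PySem.Int.toStr acc.2.1
                              else PySem.Int.toStr acc.2.1 ++ "-" ++ PySem.Int.toStr acc.2.2], n, n))
            ([], PySem.List.pyGetD nums 0 0, PySem.List.pyGetD nums 0 0)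
          let ranges := acc.1 ++ [if acc.2.1 = acc.2.2 then PySem.Int.toStr acc.2.1
                                  else PySem.Int.toStr acc.2.1 ++ "-" ++ PySem.Int.toStr acc.2.2]
          parts ++ [pre ++ "[" ++ PySem.Str.join "," ranges ++ "]"])
      []
    PySem.Str.join "," (parts ++ PySem.List.sorted st.2 (fun x => x) false)

-- ===== PORT B =====

-- B's inner `while run < len(nums) and nums[run] == nums[run-1] + 1: run += 1`.
def pvRunB (nums : List Int) (run : Nat) : Nat :=
  if h : run < nums.length ∧ nums.getD run 0 = nums.getD (run - 1) 0 + 1 then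
    pvRunB nums (run + 1)
  else run
termination_by nums.length - run
decreasing_by omega

theorem pvRunB_ge (nums : List Int) (i : Nat) : i ≤ pvRunB nums i := by
  fun_induction pvRunB nums i with
  | case1 run h ih => omega
  | case2 run h => omega

-- B's `pieces`: peel one maximal consecutive run, recurse on the rest (nums[run:] = drop run).
def pvPiecesB (nums : List Int) : List String :=
  if h : nums = [] then []
  else
    let run := pvRunB nums 1
    let lo := nums.getD 0 0
    let hi := nums.getD (run - 1) 0
    (if lo = hi then PySem.Int.toStr lo else PySem.Int.toStr lo ++ "-" ++ PySem.Int.toStr hi)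
      :: pvPiecesB (nums.drop run)
termination_by nums.length
decreasing_by
  have h1 : 1 ≤ pvRunB nums 1 := pvRunB_ge nums 1
  have h0 : nums.length ≠ 0 := fun hn => h (List.eq_nil_of_length_eq_zero hn)
  simp only [List.length_drop]; omega

def compress_hostlist_py_alt (names : List String) : String :=
  if names = [] then ""
  else if names.length = 1 then PySem.List.pyGetD names 0 ""
  else
    let st := names.foldl
      (fun (st : PySem.Dict String (List Int) × List String) name =>
        let cs := name.toList
        -- name.rstrip("0123456789"): drop trailing characters of the set (exact hand port of str.rstrip(chars); the set as its char list)
        let pl := (cs.reverse.dropWhile (fun c => (['0','1','2','3','4','5','6','7','8','9'] : List Char).contains c)).reverse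
        if pl = [] ∨ pl = cs then (st.1, st.2 ++ [name])
        else
          let pre := String.ofList pl
          let n := (PySem.Int.ofChars? (cs.drop pl.length)).getD 0   -- int(name[len(prefix):])
          (st.1.insert pre (st.1.getD pre [] ++ [n]), st.2))
      (PySem.Dict.empty, [])
    let blocks := (PySem.List.sorted st.1.keys (fun x => x) false).map (fun pre =>
      let nums := PySem.List.sorted (st.1.getD pre []) (fun x => x) false
      if nums.length = 1 then pre ++ PySem.Int.toStr (PySem.List.pyGetD nums 0 0)
      else pre ++ "[" ++ PySem.Str.join "," (pvPiecesB nums) ++ "]")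
    PySem.Str.join "," (blocks ++ PySem.List.sorted st.2 (fun x => x) false)

-- ===== PRECONDITION & SPEC =====
def Spec_compress_hostlist_py (names : List String) (out : String) : Prop := out = compress_hostlist_py_alt names
instance (names : List String) (out : String) : Decidable (Spec_compress_hostlist_py names out) := by unfold Spec_compress_hostlist_py; infer_instance

-- ===== CLAIM (what is proved, stated in full; the proofs are below) =====
def Claim_equal_compress_hostlist_py : Prop := ∀ (names : List String), Dom_compress_hostlist_py names → Spec_compress_hostlist_py names (compress_hostlist_py names)

-- ===== LEMMAS AND PROOFS =====

theorem pv_char_eq (c d : Char) (h : c.toNat = d.toNat) : c = d := Char.ext (UInt32.toNat.inj h)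

theorem pv_digits_contains (c : Char) :
    ((['0','1','2','3','4','5','6','7','8','9'] : List Char).contains c) = PySem.Chars.isdigit c := by
  have hiso : PySem.Chars.isdigit c = c.isDigit := by
    simp [PySem.Chars.isdigit, Char.isDigit, Char.le_def, UInt32.le_iff_toNat_le]
  rw [hiso]
  by_cases hd : c.isDigit
  · rw [hd]
    have hb : 48 ≤ c.toNat ∧ c.toNat ≤ 57 := by simp [Char.isDigit] at hd; exact hd
    obtain ⟨hb1, hb2⟩ := hb
    have h10 : c.toNat = 48 ∨ c.toNat = 49 ∨ c.toNat = 50 ∨ c.toNat = 51 ∨ c.toNat = 52 ∨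
        c.toNat = 53 ∨ c.toNat = 54 ∨ c.toNat = 55 ∨ c.toNat = 56 ∨ c.toNat = 57 := by omega
    rcases h10 with h|h|h|h|h|h|h|h|h|h
    · rw [pv_char_eq c '0' (by rw [h]; rfl)]; decide
    · rw [pv_char_eq c '1' (by rw [h]; rfl)]; decide
    · rw [pv_char_eq c '2' (by rw [h]; rfl)]; decide
    · rw [pv_char_eq c '3' (by rw [h]; rfl)]; decide
    · rw [pv_char_eq c '4' (by rw [h]; rfl)]; decide
    · rw [pv_char_eq c '5' (by rw [h]; rfl)]; decide
    · rw [pv_char_eq c '6' (by rw [h]; rfl)]; decide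
    · rw [pv_char_eq c '7' (by rw [h]; rfl)]; decide
    · rw [pv_char_eq c '8' (by rw [h]; rfl)]; decide
    · rw [pv_char_eq c '9' (by rw [h]; rfl)]; decide
  · simp only [Bool.not_eq_true] at hd
    rw [hd]
    have hm : c ∉ (['0','1','2','3','4','5','6','7','8','9'] : List Char) := by
      intro hm
      fin_cases hm <;> simp_all
    simpa using hm

-- length of the digit suffix of cs
def pvKsfx (cs : List Char) : Nat := (cs.reverse.takeWhile PySem.Chars.isdigit).length

theorem pvKsfx_le (cs : List Char) : pvKsfx cs ≤ cs.length := by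
  have := (List.takeWhile_prefix (l := cs.reverse) (p := PySem.Chars.isdigit)).length_le
  simpa [pvKsfx] using this

-- the canonical grouping step both ports' loop bodies reduce to
def pvStep (st : PySem.Dict String (List Int) × List String) (name : String) :
    PySem.Dict String (List Int) × List String :=
  let cs := name.toList
  let k := pvKsfx cs
  if k = 0 ∨ k = cs.length then (st.1, st.2 ++ [name])
  else
    let pre := String.ofList (cs.take (cs.length - k))
    let n := (PySem.Int.ofChars? (cs.drop (cs.length - k))).getD 0
    (st.1.insert pre (st.1.getD pre [] ++ [n]), st.2)

-- the values each side computes per name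
def pvPre (name : String) : String := String.ofList (name.toList.take (name.toList.length - pvKsfx name.toList))
def pvIsPlain (name : String) : Bool := decide (pvKsfx name.toList = 0 ∨ pvKsfx name.toList = name.toList.length)
def pvNum (name : String) : Int := (PySem.Int.ofChars? (name.toList.drop (name.toList.length - pvKsfx name.toList))).getD 0
def pvPres (L : List String) : List String := L.filterMap (fun nm => if pvIsPlain nm then none else some (pvPre nm))
def pvVals (L : List String) (p : String) : List Int :=
  L.filterMap (fun nm => if pvIsPlain nm = false ∧ pvPre nm = p then some (pvNum nm) else none)

-- A's run-compression recursion, structurally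
def pvFmt (s e : Int) : String :=
  if s = e then PySem.Int.toStr s else PySem.Int.toStr s ++ "-" ++ PySem.Int.toStr e

def pvR (s e : Int) : List Int → List String
  | [] => [pvFmt s e]
  | n :: t => if n = e + 1 then pvR s n t else pvFmt s e :: pvR n n t

def pvRunLen (e : Int) : List Int → Nat
  | [] => 0
  | m :: u => if m = e + 1 then 1 + pvRunLen m u else 0

theorem pv_scanA_general (cs : List Char) (i : Nat) (hle : i ≤ cs.length) :
    pvScanA cs i = i - ((cs.take i).reverse.takeWhile PySem.Chars.isdigit).length := by
  induction i with
  | zero => simp [pvScanA]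
  | succ i ih =>
    have hi : i < cs.length := hle
    have htake : (cs.take (i+1)).reverse = cs[i] :: (cs.take i).reverse := by
      rw [List.take_succ]
      simp [List.getElem?_eq_getElem hi]
    rw [pvScanA, htake, List.takeWhile_cons]
    have hgd : cs.getD i ' ' = cs[i] := List.getD_eq_getElem cs ' ' hi
    rw [hgd]
    by_cases hdig : PySem.Chars.isdigit cs[i] = true
    · have hlen : ((cs.take i).reverse.takeWhile PySem.Chars.isdigit).length ≤ i := by
        have := (List.takeWhile_prefix (l := (cs.take i).reverse) (p := PySem.Chars.isdigit)).length_le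
        simpa [min_eq_left (le_of_lt hi)] using this
      simp only [hdig, if_true, List.length_cons]
      rw [ih (le_of_lt hi)]
      omega
    · rw [Bool.not_eq_true] at hdig
      simp only [hdig, Bool.false_eq_true, if_false]
      simp

theorem pv_scanA_eq (cs : List Char) : pvScanA cs cs.length = cs.length - pvKsfx cs := by
  have := pv_scanA_general cs cs.length (le_refl _)
  simpa [pvKsfx] using this

theorem pv_dropWhile_eq {α : Type} (p : α → Bool) (l : List α) :
    l.dropWhile p = l.drop (l.takeWhile p).length := by
  induction l with
  | nil => simp
  | cons a l ih => by_cases h : p a <;> simp [List.dropWhile_cons, List.takeWhile_cons, h, ih]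

theorem pv_rstrip_eq (cs : List Char) :
    (cs.reverse.dropWhile (fun c => (['0','1','2','3','4','5','6','7','8','9'] : List Char).contains c)).reverse
      = cs.take (cs.length - pvKsfx cs) := by
  have hp : (fun c => (['0','1','2','3','4','5','6','7','8','9'] : List Char).contains c)
      = PySem.Chars.isdigit := funext pv_digits_contains
  rw [hp, pv_dropWhile_eq, List.reverse_drop]
  simp [pvKsfx]

theorem pv_stepA_eq :
    (fun (st : PySem.Dict String (List Int) × List String) (name : String) =>
        let cs := name.toList
        let i := pvScanA cs cs.length
        if i = cs.length ∨ i = 0 then (st.1, st.2 ++ [name])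
        else
          let pre := String.ofList (cs.take i)
          let n := (PySem.Int.ofChars? (cs.drop i)).getD 0
          (st.1.insert pre (st.1.getD pre [] ++ [n]), st.2)) = pvStep := by
  funext st name
  simp only [pvStep, pv_scanA_eq]
  have hk := pvKsfx_le name.toList
  by_cases h : pvKsfx name.toList = 0 ∨ pvKsfx name.toList = name.toList.length
  · rw [if_pos (by omega), if_pos h]
  · rw [if_neg (by omega), if_neg h]

theorem pv_stepB_eq :
    (fun (st : PySem.Dict String (List Int) × List String) (name : String) =>
        let cs := name.toList
        let pl := (cs.reverse.dropWhile (fun c => (['0','1','2','3','4','5','6','7','8','9'] : List Char).contains c)).reverse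
        if pl = [] ∨ pl = cs then (st.1, st.2 ++ [name])
        else
          let pre := String.ofList pl
          let n := (PySem.Int.ofChars? (cs.drop pl.length)).getD 0
          (st.1.insert pre (st.1.getD pre [] ++ [n]), st.2)) = pvStep := by
  funext st name
  simp only [pvStep, pv_rstrip_eq]
  have hk := pvKsfx_le name.toList
  have hlen : (name.toList.take (name.toList.length - pvKsfx name.toList)).length
      = name.toList.length - pvKsfx name.toList := by
    simp [List.length_take]
  by_cases h : pvKsfx name.toList = 0 ∨ pvKsfx name.toList = name.toList.length
  · rw [if_pos, if_pos h]
    rcases h with h | h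
    · right; simp [h, List.take_eq_self_iff]
    · left; rw [List.take_eq_nil_iff]; left; omega
  · rw [if_neg, if_neg h]
    · rw [hlen]
    · push_neg at h
      rw [List.take_eq_nil_iff, List.take_eq_self_iff]
      intro hc
      rcases hc with hc | hc
      · rcases hc with hc | hc
        · omega
        · have : name.toList.length = 0 := by simpa using congrArg List.length hc
          omega
      · omega

theorem pv_fold_plain (L : List String) (d : PySem.Dict String (List Int)) (pl : List String) :
    (L.foldl pvStep (d, pl)).2 = pl ++ L.filter pvIsPlain := by
  induction L generalizing d pl with
  | nil => simp
  | cons nm L ih =>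
    rw [List.foldl_cons]
    by_cases hp : pvIsPlain nm
    · have hstep : pvStep (d, pl) nm = (d, pl ++ [nm]) := by
        simp only [pvStep]
        rw [if_pos (by simpa [pvIsPlain] using hp)]
      rw [hstep, ih, List.filter_cons, if_pos hp]
      simp
    · have hstep : pvStep (d, pl) nm =
          (d.insert (pvPre nm) (d.getD (pvPre nm) [] ++ [pvNum nm]), pl) := by
        simp only [pvStep]
        rw [if_neg (by simpa [pvIsPlain] using hp)]
        rfl
      rw [hstep, ih, List.filter_cons, if_neg hp]

theorem pv_fold_getD (L : List String) (d : PySem.Dict String (List Int)) (pl : List String)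
    (p : String) : (L.foldl pvStep (d, pl)).1.getD p [] = d.getD p [] ++ pvVals L p := by
  induction L generalizing d pl with
  | nil => simp [pvVals]
  | cons nm L ih =>
    rw [List.foldl_cons]
    by_cases hp : pvIsPlain nm
    · have hstep : pvStep (d, pl) nm = (d, pl ++ [nm]) := by
        simp only [pvStep]
        rw [if_pos (by simpa [pvIsPlain] using hp)]
      rw [hstep, ih]
      have : pvVals (nm :: L) p = pvVals L p := by
        simp only [pvVals, List.filterMap_cons]
        rw [if_neg (by simp [hp])]
      rw [this]
    · have hstep : pvStep (d, pl) nm =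
          (d.insert (pvPre nm) (d.getD (pvPre nm) [] ++ [pvNum nm]), pl) := by
        simp only [pvStep]
        rw [if_neg (by simpa [pvIsPlain] using hp)]
        rfl
      rw [hstep, ih, PySem.Dict.getD_insert]
      by_cases hpre : p = pvPre nm
      · rw [if_pos hpre]
        have : pvVals (nm :: L) p = pvNum nm :: pvVals L p := by
          simp only [pvVals, List.filterMap_cons]
          rw [if_pos ⟨by simpa using hp, hpre.symm⟩]
        rw [this]
        simp [hpre]
      · rw [if_neg hpre]
        have : pvVals (nm :: L) p = pvVals L p := by
          simp only [pvVals, List.filterMap_cons]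
          rw [if_neg (by intro hand; exact hpre hand.2.symm)]
        rw [this]

theorem pv_fold_keys (L : List String) (d : PySem.Dict String (List Int)) (pl : List String) :
    (L.foldl pvStep (d, pl)).1.keys = PySem.Set.update d.keys (pvPres L) := by
  induction L generalizing d pl with
  | nil => simp [pvPres, PySem.Set.update]
  | cons nm L ih =>
    rw [List.foldl_cons]
    by_cases hp : pvIsPlain nm
    · have hstep : pvStep (d, pl) nm = (d, pl ++ [nm]) := by
        simp only [pvStep]
        rw [if_pos (by simpa [pvIsPlain] using hp)]
      rw [hstep, ih]
      have : pvPres (nm :: L) = pvPres L := by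
        simp only [pvPres, List.filterMap_cons]
        rw [if_pos hp]
      rw [this]
    · have hstep : pvStep (d, pl) nm =
          (d.insert (pvPre nm) (d.getD (pvPre nm) [] ++ [pvNum nm]), pl) := by
        simp only [pvStep]
        rw [if_neg (by simpa [pvIsPlain] using hp)]
        rfl
      rw [hstep, ih]
      have hpres : pvPres (nm :: L) = pvPre nm :: pvPres L := by
        simp only [pvPres, List.filterMap_cons]
        rw [if_neg (by simp [hp])]
      rw [hpres]
      have hupd : PySem.Set.update d.keys (pvPre nm :: pvPres L)
          = PySem.Set.update (PySem.Set.add d.keys (pvPre nm)) (pvPres L) := by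
        simp [PySem.Set.update]
      rw [hupd]
      by_cases hc : d.contains (pvPre nm)
      · rw [PySem.Dict.keys_insert_of_contains d _ hc]
        have : PySem.Set.add d.keys (pvPre nm) = d.keys := by
          simp only [PySem.Set.add]
          rw [if_pos]
          have := (PySem.Dict.contains_iff_mem_keys d (pvPre nm)).mp hc
          simpa using this
        rw [this]
      · rw [Bool.not_eq_true] at hc
        rw [PySem.Dict.keys_insert_of_not_contains d _ hc]
        have : PySem.Set.add d.keys (pvPre nm) = d.keys ++ [pvPre nm] := by
          simp only [PySem.Set.add]
          rw [if_neg]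
          intro hmem
          have : d.contains (pvPre nm) = true :=
            (PySem.Dict.contains_iff_mem_keys d (pvPre nm)).mpr (by simpa using hmem)
          rw [hc] at this; exact Bool.false_ne_true this
        rw [this]

def pvStepR (acc : List String × Int × Int) (n : Int) : List String × Int × Int :=
  if n = acc.2.2 + 1 then (acc.1, acc.2.1, n)
  else (acc.1 ++ [if acc.2.1 = acc.2.2 then PySem.Int.toStr acc.2.1
                  else PySem.Int.toStr acc.2.1 ++ "-" ++ PySem.Int.toStr acc.2.2], n, n)

theorem pv_foldA_ranges (l : List Int) (rs : List String) (s e : Int) :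
    (l.foldl pvStepR (rs, s, e)).1
      ++ [pvFmt (l.foldl pvStepR (rs, s, e)).2.1 (l.foldl pvStepR (rs, s, e)).2.2]
      = rs ++ pvR s e l := by
  induction l generalizing rs s e with
  | nil => simp [pvR, pvFmt]
  | cons n t ih =>
    rw [List.foldl_cons, pvR]
    by_cases h : n = e + 1
    · have : pvStepR (rs, s, e) n = (rs, s, n) := by simp [pvStepR, h]
      rw [this, if_pos h, ih]
    · have : pvStepR (rs, s, e) n = (rs ++ [pvFmt s e], n, n) := by
        simp only [pvStepR, pvFmt]
        rw [if_neg h]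
      rw [this, if_neg h, ih]
      simp

theorem pv_runB_eq (nums : List Int) (i : Nat) (h1 : 1 ≤ i) (h2 : i ≤ nums.length) :
    pvRunB nums i = i + pvRunLen (nums.getD (i - 1) 0) (nums.drop i) := by
  generalize hfuel : nums.length - i = fuel
  induction fuel generalizing i with
  | zero =>
    have hi : i = nums.length := by omega
    rw [pvRunB]
    rw [dif_neg (by omega)]
    simp [hi, pvRunLen]
  | succ fuel ih =>
    have hi : i < nums.length := by omega
    have hdrop : nums.drop i = nums[i] :: nums.drop (i + 1) := List.drop_eq_getElem_cons hi
    rw [pvRunB]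
    by_cases hc : nums.getD i 0 = nums.getD (i - 1) 0 + 1
    · rw [dif_pos ⟨hi, hc⟩, ih (i + 1) (by omega) (by omega) (by omega)]
      rw [hdrop, pvRunLen]
      have hg : nums.getD i 0 = nums[i] := List.getD_eq_getElem nums 0 hi
      rw [if_pos (by rw [← hg]; exact hc)]
      have : nums.getD (i + 1 - 1) 0 = nums[i] := by
        simpa using List.getD_eq_getElem nums 0 hi
      rw [this]
      omega
    · rw [dif_neg (by intro hand; exact hc hand.2)]
      rw [hdrop, pvRunLen]
      have hg : nums.getD i 0 = nums[i] := List.getD_eq_getElem nums 0 hi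
      rw [if_neg (by rw [← hg]; exact hc)]
      omega

theorem pv_piecesB_cons (n : Int) (t : List Int) :
    pvPiecesB (n :: t) = pvFmt n ((n :: t).getD (pvRunLen n t) 0) :: pvPiecesB (t.drop (pvRunLen n t)) := by
  rw [pvPiecesB]
  rw [dif_neg (List.cons_ne_nil n t)]
  have hrun : pvRunB (n :: t) 1 = 1 + pvRunLen n t := by
    have := pv_runB_eq (n :: t) 1 (le_refl 1) (by simp)
    simpa using this
  rw [hrun]
  have h1 : 1 + pvRunLen n t - 1 = pvRunLen n t := by omega
  have h2 : (n :: t).drop (1 + pvRunLen n t) = t.drop (pvRunLen n t) := by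
    rw [Nat.add_comm, List.drop_succ_cons]
  simp only [h1, h2, pvFmt, List.getD_cons_zero]

theorem pv_piecesB_eq_R_aux (N : Nat) : ∀ (t : List Int), t.length ≤ N → ∀ (s e : Int),
    pvFmt s ((e :: t).getD (pvRunLen e t) 0) :: pvPiecesB (t.drop (pvRunLen e t)) = pvR s e t := by
  induction N with
  | zero =>
    intro t ht s e
    have : t = [] := List.eq_nil_of_length_eq_zero (by omega)
    subst this
    simp [pvRunLen, pvR, pvPiecesB]
  | succ N ih =>
    intro t ht s e
    cases t with
    | nil => simp [pvRunLen, pvR, pvPiecesB]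
    | cons m u =>
      rw [pvR]
      by_cases h : m = e + 1
      · rw [if_pos h]
        have hrl : pvRunLen e (m :: u) = 1 + pvRunLen m u := by
          rw [pvRunLen, if_pos h]
        rw [hrl]
        have h1 : (e :: m :: u).getD (1 + pvRunLen m u) 0 = (m :: u).getD (pvRunLen m u) 0 := by
          have : 1 + pvRunLen m u = pvRunLen m u + 1 := by omega
          rw [this]
          simp
        have h2 : (m :: u).drop (1 + pvRunLen m u) = u.drop (pvRunLen m u) := by
          have : 1 + pvRunLen m u = pvRunLen m u + 1 := by omega
          rw [this, List.drop_succ_cons]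
        rw [h1, h2]
        exact ih u (by simp at ht; omega) s m
      · rw [if_neg h]
        have hrl : pvRunLen e (m :: u) = 0 := by rw [pvRunLen, if_neg h]
        rw [hrl]
        simp only [List.getD_cons_zero, List.drop_zero]
        congr 1
        rw [pv_piecesB_cons]
        exact ih u (by simp at ht; omega) m m

theorem pv_piecesB_eq (n : Int) (t : List Int) : pvPiecesB (n :: t) = pvR n n t := by
  rw [pv_piecesB_cons]
  exact pv_piecesB_eq_R_aux t.length t (le_refl _) n n

theorem pv_vals_ne_nil (L : List String) (p : String) (hp : p ∈ pvPres L) :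
    pvVals L p ≠ [] := by
  simp only [pvPres, List.mem_filterMap] at hp
  obtain ⟨nm, hmem, heq⟩ := hp
  by_cases hpl : pvIsPlain nm
  · rw [if_pos hpl] at heq; exact absurd heq (by simp)
  · rw [if_neg hpl] at heq
    have hval : pvNum nm ∈ pvVals L p := by
      simp only [pvVals, List.mem_filterMap]
      exact ⟨nm, hmem, by rw [if_pos ⟨by simpa using hpl, by simpa using heq⟩]⟩
    exact List.ne_nil_of_mem hval

def pvRangesA (nums : List Int) : List String :=
  let acc := (nums.drop 1).foldl pvStepR ([], PySem.List.pyGetD nums 0 0, PySem.List.pyGetD nums 0 0)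
  acc.1 ++ [pvFmt acc.2.1 acc.2.2]

def pvBlockA (d : PySem.Dict String (List Int)) (pre : String) : String :=
  let nums := PySem.List.sorted (d.getD pre []) (fun x => x) false
  if nums.length = 1 then pre ++ PySem.Int.toStr (PySem.List.pyGetD nums 0 0)
  else pre ++ "[" ++ PySem.Str.join "," (pvRangesA nums) ++ "]"

def pvBlockB (d : PySem.Dict String (List Int)) (pre : String) : String :=
  let nums := PySem.List.sorted (d.getD pre []) (fun x => x) false
  if nums.length = 1 then pre ++ PySem.Int.toStr (PySem.List.pyGetD nums 0 0)
  else pre ++ "[" ++ PySem.Str.join "," (pvPiecesB nums) ++ "]"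

theorem pvRangesA_eq_piecesB (n : Int) (t : List Int) : pvRangesA (n :: t) = pvPiecesB (n :: t) := by
  have h := pv_foldA_ranges t [] n n
  rw [pv_piecesB_eq]
  simp only [pvRangesA, List.drop_one, List.tail_cons, PySem.List.pyGetD_zero_cons]
  simpa using h

theorem pv_block_eq (dA dB : PySem.Dict String (List Int)) (p : String)
    (hg : PySem.List.sorted (dA.getD p []) (fun x => x) false
        = PySem.List.sorted (dB.getD p []) (fun x => x) false)
    (hne : dB.getD p [] ≠ []) : pvBlockA dA p = pvBlockB dB p := by
  simp only [pvBlockA, pvBlockB, hg]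
  have hnil : PySem.List.sorted (dB.getD p []) (fun x => x) false ≠ [] := by
    rw [Ne, PySem.List.sorted_eq_nil_iff]; exact hne
  cases hn : PySem.List.sorted (dB.getD p []) (fun x => x) false with
  | nil => exact absurd hn hnil
  | cons n t =>
    by_cases hl : (n :: t : List Int).length = 1
    · rw [if_pos hl, if_pos hl]
    · rw [if_neg hl, if_neg hl, pvRangesA_eq_piecesB]

theorem pv_assemble (stA stB : PySem.Dict String (List Int) × List String)
    (hkeys : PySem.List.sorted stA.1.keys (fun x => x) false
        = PySem.List.sorted stB.1.keys (fun x => x) false)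
    (hnums : ∀ p, PySem.List.sorted (stA.1.getD p []) (fun x => x) false
        = PySem.List.sorted (stB.1.getD p []) (fun x => x) false)
    (hne : ∀ p ∈ stB.1.keys, stB.1.getD p [] ≠ [])
    (hplain : PySem.List.sorted stA.2 (fun x => x) false
        = PySem.List.sorted stB.2 (fun x => x) false) :
    PySem.Str.join "," ((PySem.List.sorted stA.1.keys (fun x => x) false).foldl
      (fun (parts : List String) pre =>
        let nums := PySem.List.sorted (stA.1.getD pre []) (fun x => x) false
        if nums.length = 1 then parts ++ [pre ++ PySem.Int.toStr (PySem.List.pyGetD nums 0 0)]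
        else
          let acc := (nums.drop 1).foldl
            (fun (acc : List String × Int × Int) n =>
              if n = acc.2.2 + 1 then (acc.1, acc.2.1, n)
              else (acc.1 ++ [if acc.2.1 = acc.2.2 then PySem.Int.toStr acc.2.1
                              else PySem.Int.toStr acc.2.1 ++ "-" ++ PySem.Int.toStr acc.2.2], n, n))
            ([], PySem.List.pyGetD nums 0 0, PySem.List.pyGetD nums 0 0)
          let ranges := acc.1 ++ [if acc.2.1 = acc.2.2 then PySem.Int.toStr acc.2.1
                                  else PySem.Int.toStr acc.2.1 ++ "-" ++ PySem.Int.toStr acc.2.2]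
          parts ++ [pre ++ "[" ++ PySem.Str.join "," ranges ++ "]"])
      [] ++ PySem.List.sorted stA.2 (fun x => x) false)
    = PySem.Str.join "," ((PySem.List.sorted stB.1.keys (fun x => x) false).map
      (fun pre =>
        let nums := PySem.List.sorted (stB.1.getD pre []) (fun x => x) false
        if nums.length = 1 then pre ++ PySem.Int.toStr (PySem.List.pyGetD nums 0 0)
        else pre ++ "[" ++ PySem.Str.join "," (pvPiecesB nums) ++ "]")
      ++ PySem.List.sorted stB.2 (fun x => x) false) := by
  have hbodyA : (fun (parts : List String) pre =>
        let nums := PySem.List.sorted (stA.1.getD pre []) (fun x => x) false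
        if nums.length = 1 then parts ++ [pre ++ PySem.Int.toStr (PySem.List.pyGetD nums 0 0)]
        else
          let acc := (nums.drop 1).foldl
            (fun (acc : List String × Int × Int) n =>
              if n = acc.2.2 + 1 then (acc.1, acc.2.1, n)
              else (acc.1 ++ [if acc.2.1 = acc.2.2 then PySem.Int.toStr acc.2.1
                              else PySem.Int.toStr acc.2.1 ++ "-" ++ PySem.Int.toStr acc.2.2], n, n))
            ([], PySem.List.pyGetD nums 0 0, PySem.List.pyGetD nums 0 0)
          let ranges := acc.1 ++ [if acc.2.1 = acc.2.2 then PySem.Int.toStr acc.2.1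
                                  else PySem.Int.toStr acc.2.1 ++ "-" ++ PySem.Int.toStr acc.2.2]
          parts ++ [pre ++ "[" ++ PySem.Str.join "," ranges ++ "]"])
      = fun (parts : List String) pre => parts ++ [pvBlockA stA.1 pre] := by
    funext parts pre
    have hR : (fun (acc : List String × Int × Int) n =>
        if n = acc.2.2 + 1 then (acc.1, acc.2.1, n)
        else (acc.1 ++ [if acc.2.1 = acc.2.2 then PySem.Int.toStr acc.2.1
                        else PySem.Int.toStr acc.2.1 ++ "-" ++ PySem.Int.toStr acc.2.2], n, n))
        = pvStepR := rfl
    simp only [pvBlockA, pvRangesA, pvFmt, hR]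
    by_cases hl : (PySem.List.sorted (stA.1.getD pre []) (fun x => x) false).length = 1
    · rw [if_pos hl, if_pos hl]
    · rw [if_neg hl, if_neg hl]
  have hbodyB : (fun pre =>
        let nums := PySem.List.sorted (stB.1.getD pre []) (fun x => x) false
        if nums.length = 1 then pre ++ PySem.Int.toStr (PySem.List.pyGetD nums 0 0)
        else pre ++ "[" ++ PySem.Str.join "," (pvPiecesB nums) ++ "]") = pvBlockB stB.1 := rfl
  rw [hbodyA, hbodyB, PySem.List.foldl_append_singleton_eq_map, List.nil_append, hkeys, hplain]
  congr 1
  congr 1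
  exact List.map_congr_left (fun p hp => pv_block_eq stA.1 stB.1 p (hnums p)
    (hne p ((PySem.List.mem_sorted _ _ _ _).mp hp)))

-- ===== VERDICT (by name: the statement is the Claim_ definition above) =====
theorem compress_hostlist_py_spec : Claim_equal_compress_hostlist_py := by
  intro names _hdom
  unfold Spec_compress_hostlist_py compress_hostlist_py compress_hostlist_py_alt
  by_cases h0 : names = []
  · rw [if_pos h0, if_pos h0]
  · rw [if_neg h0, if_neg h0]
    by_cases h1 : names.length = 1
    · rw [if_pos h1, if_pos h1]
    · rw [if_neg h1, if_neg h1, pv_stepA_eq, pv_stepB_eq]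
      have hperm : (PySem.List.sorted names (fun x => x) false).Perm names :=
        PySem.List.sorted_perm names (fun x => x) false
      refine pv_assemble
        ((PySem.List.sorted names (fun x => x) false).foldl pvStep (PySem.Dict.empty, []))
        (names.foldl pvStep (PySem.Dict.empty, [])) ?_ ?_ ?_ ?_
      · rw [pv_fold_keys, pv_fold_keys]
        simp only [PySem.Dict.keys_empty, PySem.Set.update_nil_left]
        refine PySem.List.sorted_eq_sorted_of_perm _ _ _ (fun a b h => h) ?_
        refine (List.perm_ext_iff_of_nodup (PySem.Set.nodup_ofList _) (PySem.Set.nodup_ofList _)).mpr ?_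
        intro a
        rw [PySem.Set.mem_ofList, PySem.Set.mem_ofList]
        exact (hperm.filterMap _).mem_iff
      · intro p
        rw [pv_fold_getD, pv_fold_getD]
        simp only [PySem.Dict.getD_empty, List.nil_append]
        exact PySem.List.sorted_eq_sorted_of_perm _ _ _ (fun a b h => h) (hperm.filterMap _)
      · intro p hp
        rw [pv_fold_getD]
        simp only [PySem.Dict.getD_empty, List.nil_append]
        rw [pv_fold_keys] at hp
        simp only [PySem.Dict.keys_empty, PySem.Set.update_nil_left] at hp
        exact pv_vals_ne_nil names p ((PySem.Set.mem_ofList _ _).mp hp)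
      · rw [pv_fold_plain, pv_fold_plain]
        simp only [List.nil_append]
        exact PySem.List.sorted_eq_sorted_of_perm _ _ _ (fun a b h => h) (hperm.filter _)
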